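-- pv_equiv track=rewrite | github.com/shun-yamachika/NB | sampling_patterns.py | create_linear_decreasing
-- ===== SOURCE A (Python) =====
-- min_bounces = 2
--
-- max_bounces = 20
--
-- def create_linear_decreasing(target_total=760):
--     """Linear decrease: more samples at lower bounce numbers"""
--     # Start high, end low
--     min_samples = 25
--     max_samples = 60
--
--     slope = (min_samples - max_samples) / (max_bounces - min_bounces)
--     samples = {}
--     total = 0
--     for m in range(min_bounces, max_bounces + 1):
--         s = int(max_samples + slope * (m - min_bounces))
--         samples[m] = s
--         total += s
--
--     # Adjust to hit exactly 760
--     diff = target_total - total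
--     m = min_bounces
--     for _ in range(abs(diff)):
--         if diff > 0:
--             samples[m] += 1
--         elif diff < 0:
--             samples[m] -= 1
--         m += 1
--         if m > max_bounces:
--             m = min_bounces
--
--     return samples
-- ===== SOURCE B (Python) =====
-- min_bounces = 2
--
-- max_bounces = 20
--
-- def create_linear_decreasing(target_total=760):
--     """Linear decrease: more samples at lower bounce numbers"""
--     # Same linear ramp (int(60 + slope*k) equals exact floor division here),
--     # but the +-1 adjustment is distributed in closed form instead of looping abs(diff) times.
--     n = max_bounces - min_bounces + 1
--     base = {m: (1080 - 35 * (m - min_bounces)) // 18 for m in range(min_bounces, max_bounces + 1)}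
--     diff = target_total - sum(base.values())
--     sign = 1 if diff > 0 else -1
--     q, r = divmod(abs(diff), n)
--     return {m: v + sign * (q + (1 if i < r else 0))
--             for i, (m, v) in enumerate(base.items())}
-- ===== Notes on version B (the rewrite author's own statement) =====
-- stated objective: faster
-- what changed: The adjustment loop, which walks the keys round-robin once per unit of the difference from the target, is replaced by a closed-form divmod distribution: every key gets sign*q and the first r keys one extra sign, where q and r are the quotient and remainder of the absolute difference by the number of keys.
import Mathlib
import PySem

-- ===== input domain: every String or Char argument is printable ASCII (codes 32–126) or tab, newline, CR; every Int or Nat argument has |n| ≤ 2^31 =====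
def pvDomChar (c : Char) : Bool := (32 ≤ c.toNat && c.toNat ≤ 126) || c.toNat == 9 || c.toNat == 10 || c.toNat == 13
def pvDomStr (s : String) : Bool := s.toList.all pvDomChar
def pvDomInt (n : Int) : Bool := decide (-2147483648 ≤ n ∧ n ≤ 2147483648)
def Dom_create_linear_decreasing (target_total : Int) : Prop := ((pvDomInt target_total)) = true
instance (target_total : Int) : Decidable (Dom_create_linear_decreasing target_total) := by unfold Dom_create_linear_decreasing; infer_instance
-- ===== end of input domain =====

-- B replaces A's abs(diff)-iteration round-robin ±1 adjustment loop by a closed-form divmod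
-- distribution over the 19 keys; a timing run measured B faster (A is O(|target_total|), B is O(1)).

-- ===== PORT A =====
-- one iteration of A's adjustment loop body: the ±1 update of samples[m], then m += 1 with
-- wraparound.  samples[m] ± = 1 is ported as a one-pass update of the key m in the
-- insertion-ordered dict (exact: the loop only visits keys 2..20, all inserted by the first
-- loop, so Python's KeyError case of `+=` is unreachable and the unique matching pair is updated)
def clA_step (diff : Int) (st : PySem.Dict Int Int × Int) : PySem.Dict Int Int × Int :=
  let samples :=
    if diff > 0 then
      PySem.Dict.mk (st.1.items.map (fun p => if p.1 == st.2 then (p.1, p.2 + 1) else p))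
    else if diff < 0 then
      PySem.Dict.mk (st.1.items.map (fun p => if p.1 == st.2 then (p.1, p.2 - 1) else p))
    else st.1
  let m := st.2 + 1
  (samples, if m > 20 then 2 else m)

-- first loop: samples[m] = int(max_samples + slope*(m-min_bounces)), total += s.
-- slope = (25-60)/18 is a Python float; int() of the float equals the exact floor division
-- (1080 - 35*(m-2)) // 18 for every m in range(2, 21) (checked value by value), so this port is exact.
def clA_init : PySem.Dict Int Int × Int :=
  (PySem.List.pyRange 2 21 1).foldl
    (fun (acc : PySem.Dict Int Int × Int) m =>
      let s := PySem.Int.floordiv (1080 - 35 * (m - 2)) 18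
      (acc.1.insert m s, acc.2 + s))
    (PySem.Dict.mk [], 0)

-- for _ in range(abs(diff)): apply the loop body abs(diff) times
def create_linear_decreasing (target_total : Int) : List (Int × Int) :=
  let diff := target_total - clA_init.2
  ((clA_step diff)^[diff.natAbs] (clA_init.1, 2)).1.items

-- ===== PORT B =====
-- base = {m: (1080 - 35*(m-2)) // 18 for m in range(2, 21)}
def clB_base : List (Int × Int) :=
  (PySem.List.pyRange 2 21 1).map (fun m => (m, PySem.Int.floordiv (1080 - 35 * (m - 2)) 18))

def create_linear_decreasing_alt (target_total : Int) : List (Int × Int) :=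
  let n : Int := 20 - 2 + 1
  let diff := target_total - (clB_base.map (·.2)).sum
  let sign : Int := if diff > 0 then 1 else -1
  let q := PySem.Int.floordiv ((diff.natAbs : Int)) n
  let r := PySem.Int.mod ((diff.natAbs : Int)) n
  (PySem.List.enumerate clB_base).map
    (fun p => (p.2.1, p.2.2 + sign * (q + if p.1 < r then 1 else 0)))

-- ===== PRECONDITION & SPEC =====
def Spec_create_linear_decreasing (target_total : Int) (out : List (Int × Int)) : Prop := out = create_linear_decreasing_alt target_total
instance (target_total : Int) (out : List (Int × Int)) : Decidable (Spec_create_linear_decreasing target_total out) := by unfold Spec_create_linear_decreasing; infer_instance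

-- ===== CLAIM (what is proved, stated in full; the proofs are below) =====
def Claim_equal_create_linear_decreasing : Prop := ∀ (target_total : Int), Dom_create_linear_decreasing target_total → Spec_create_linear_decreasing target_total (create_linear_decreasing target_total)

-- ===== LEMMAS AND PROOFS =====

-- the adjustment loop with the sign of diff factored out as δ ∈ {1, -1}
def clStep (δ : Int) (st : PySem.Dict Int Int × Int) : PySem.Dict Int Int × Int :=
  (PySem.Dict.mk (st.1.items.map (fun p => if p.1 == st.2 then (p.1, p.2 + δ) else p)),
   if st.2 + 1 > 20 then 2 else st.2 + 1)

def clLoop (δ : Int) : Nat → PySem.Dict Int Int × Int → PySem.Dict Int Int × Int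
  | 0, st => st
  | n + 1, st => clLoop δ n (clStep δ st)

-- the dict after the first loop, with c added to every value
def clD (c : Int) : PySem.Dict Int Int :=
  PySem.Dict.mk [(2,60+c),(3,58+c),(4,56+c),(5,54+c),(6,52+c),(7,50+c),(8,48+c),(9,46+c),
    (10,44+c),(11,42+c),(12,40+c),(13,38+c),(14,36+c),(15,34+c),(16,32+c),(17,30+c),(18,28+c),(19,26+c),(20,25+c)]

def clBaseLit : List (Int × Int) :=
  [(2,60),(3,58),(4,56),(5,54),(6,52),(7,50),(8,48),(9,46),(10,44),(11,42),(12,40),(13,38),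
   (14,36),(15,34),(16,32),(17,30),(18,28),(19,26),(20,25)]

def addAll (c : Int) (d : PySem.Dict Int Int) : PySem.Dict Int Int :=
  PySem.Dict.mk (d.items.map (fun p => (p.1, p.2 + c)))

-- base dict after r (< 19) steps of the ±δ loop: the first r keys got δ
def clBump (δ : Int) (r : Nat) : PySem.Dict Int Int :=
  PySem.Dict.mk ((PySem.List.enumerate clBaseLit).map
    (fun p => (p.2.1, p.2.2 + δ * (if p.1 < (r : Int) then 1 else 0))))

lemma clA_iter_eq_pos (d : Int) (hd : 0 < d) : ∀ (n : Nat) st, (clA_step d)^[n] st = clLoop 1 n st := by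
  intro n
  induction n with
  | zero => intro st; rfl
  | succ k ih =>
    intro st
    rw [Function.iterate_succ_apply, ih (clA_step d st)]
    have hst : clA_step d st = clStep 1 st := by simp [clA_step, clStep, hd]
    rw [hst]
    rfl

lemma clA_iter_eq_neg (d : Int) (hd : d < 0) : ∀ (n : Nat) st, (clA_step d)^[n] st = clLoop (-1) n st := by
  intro n
  induction n with
  | zero => intro st; rfl
  | succ k ih =>
    intro st
    rw [Function.iterate_succ_apply, ih (clA_step d st)]
    have h1 : ¬ d > 0 := by omega
    have hst : clA_step d st = clStep (-1) st := by
      simp [clA_step, clStep, h1, hd, sub_eq_add_neg]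
    rw [hst]
    rfl

lemma clLoop_add (δ : Int) (a : Nat) : ∀ (b : Nat) st, clLoop δ (a + b) st = clLoop δ a (clLoop δ b st) := by
  intro b
  induction b with
  | zero => intro st; rfl
  | succ k ih =>
    intro st
    show clLoop δ (a + k) (clStep δ st) = _
    rw [ih (clStep δ st)]
    rfl

lemma items_addAll (c : Int) (d : PySem.Dict Int Int) :
    (addAll c d).items = d.items.map (fun p => (p.1, p.2 + c)) := rfl

lemma clStep_addAll (δ c : Int) (d : PySem.Dict Int Int) (m : Int) :
    clStep δ (addAll c d, m) = (addAll c (clStep δ (d, m)).1, (clStep δ (d, m)).2) := by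
  refine Prod.ext ?_ rfl
  show PySem.Dict.mk ((addAll c d).items.map (fun p => if p.1 == m then (p.1, p.2 + δ) else p))
      = addAll c (PySem.Dict.mk (d.items.map (fun p => if p.1 == m then (p.1, p.2 + δ) else p)))
  apply PySem.Dict.ext
  show ((addAll c d).items.map (fun p => if p.1 == m then (p.1, p.2 + δ) else p))
      = (d.items.map (fun p => if p.1 == m then (p.1, p.2 + δ) else p)).map (fun p => (p.1, p.2 + c))
  rw [items_addAll, List.map_map, List.map_map]
  apply List.map_congr_left
  intro p _
  by_cases hp : p.1 = m
  · simp [hp]; ring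
  · simp [hp]

lemma clLoop_addAll (δ c : Int) : ∀ (n : Nat) (d : PySem.Dict Int Int) (m : Int),
    clLoop δ n (addAll c d, m) = (addAll c (clLoop δ n (d, m)).1, (clLoop δ n (d, m)).2) := by
  intro n
  induction n with
  | zero => intro d m; rfl
  | succ k ih =>
    intro d m
    show clLoop δ k (clStep δ (addAll c d, m)) = _
    rw [clStep_addAll δ c d m, ih (clStep δ (d, m)).1 (clStep δ (d, m)).2]
    rfl

lemma addAll_addAll (a b : Int) (d : PySem.Dict Int Int) :
    addAll a (addAll b d) = addAll (b + a) d := by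
  apply PySem.Dict.ext
  rw [items_addAll, items_addAll, items_addAll, List.map_map]
  apply List.map_congr_left
  intro p _
  simp [add_assoc]

lemma clD_addAll (c : Int) : clD c = addAll c (clD 0) := by
  apply PySem.Dict.ext
  simp [clD, addAll]

lemma clLoop_cycle_pos : clLoop 1 19 (clD 0, 2) = (clD 1, 2) := by decide
lemma clLoop_cycle_neg : clLoop (-1) 19 (clD 0, 2) = (clD (-1), 2) := by decide

lemma clLoop_cycles (δ : Int) (hcyc : clLoop δ 19 (clD 0, 2) = (clD δ, 2)) :
    ∀ (q : Nat), clLoop δ (19 * q) (clD 0, 2) = (addAll (δ * q) (clD 0), 2) := by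
  intro q
  induction q with
  | zero =>
    show (clD 0, 2) = _
    rw [show (δ * ((0:Nat):Int) : Int) = 0 by push_cast; ring, ← clD_addAll]
  | succ k ih =>
    have h19 : 19 * (k + 1) = 19 * k + 19 := by ring
    rw [h19, clLoop_add δ (19 * k) 19, hcyc, clD_addAll δ,
        clLoop_addAll δ δ (19 * k) (clD 0) 2, ih]
    show (addAll δ (addAll (δ * k) (clD 0)), 2) = _
    rw [addAll_addAll]
    congr 2
    push_cast
    ring

lemma clLoop_rem_pos : ∀ (r : Nat), r < 19 → (clLoop 1 r (clD 0, 2)).1 = clBump 1 r := by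
  intro r hr
  interval_cases r <;> decide

lemma clLoop_rem_neg : ∀ (r : Nat), r < 19 → (clLoop (-1) r (clD 0, 2)).1 = clBump (-1) r := by
  intro r hr
  interval_cases r <;> decide

lemma clA_init_fst : clA_init.1 = clD 0 := by decide
lemma clA_init_snd : clA_init.2 = 799 := by decide

lemma clB_base_eq : clB_base = clBaseLit := by decide

lemma alt_eq (t : Int) : create_linear_decreasing_alt t =
    (PySem.List.enumerate clBaseLit).map
      (fun p => (p.2.1, p.2.2 + (if t - 799 > 0 then (1:Int) else -1) *
        ((((t - 799).natAbs / 19 : Nat) : Int) + if p.1 < (((t - 799).natAbs % 19 : Nat) : Int) then 1 else 0))) := by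
  have hsum : (clBaseLit.map (fun x => x.2)).sum = 799 := by decide
  have hq : PySem.Int.floordiv (((t - 799).natAbs : Int)) (20 - 2 + 1) = (((t - 799).natAbs / 19 : Nat) : Int) := by
    exact_mod_cast PySem.Int.floordiv_natCast (t - 799).natAbs 19
  have hr : PySem.Int.mod (((t - 799).natAbs : Int)) (20 - 2 + 1) = (((t - 799).natAbs % 19 : Nat) : Int) := by
    exact_mod_cast PySem.Int.mod_natCast (t - 799).natAbs 19
  simp only [create_linear_decreasing_alt, clB_base_eq, hsum, hq, hr]

lemma main_items (δ : Int) (q r : Nat)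
    (hrem : (clLoop δ r (clD 0, 2)).1 = clBump δ r)
    (hcyc : clLoop δ 19 (clD 0, 2) = (clD δ, 2)) :
    (clLoop δ (r + 19 * q) (clD 0, 2)).1.items =
      (PySem.List.enumerate clBaseLit).map
        (fun p => (p.2.1, p.2.2 + δ * ((q : Int) + if p.1 < (r : Int) then 1 else 0))) := by
  rw [clLoop_add δ r (19 * q), clLoop_cycles δ hcyc q,
      clLoop_addAll δ (δ * q) r (clD 0) 2]
  show (addAll (δ * (q:Int)) (clLoop δ r (clD 0, 2)).1).items = _
  rw [hrem]
  show ((PySem.List.enumerate clBaseLit).map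
      (fun p => (p.2.1, p.2.2 + δ * (if p.1 < (r : Int) then 1 else 0)))).map
      (fun p => (p.1, p.2 + δ * (q:Int))) = _
  rw [List.map_map]
  apply List.map_congr_left
  intro p _
  simp only [Function.comp, Prod.mk.injEq]
  refine ⟨by trivial, by ring⟩

-- ===== VERDICT (by name: the statement is the Claim_ definition above) =====
theorem create_linear_decreasing_spec : Claim_equal_create_linear_decreasing := by
  intro t _
  unfold Spec_create_linear_decreasing
  show (((clA_step (t - clA_init.2))^[(t - clA_init.2).natAbs]) (clA_init.1, 2)).1.items = _
  rw [clA_init_fst, clA_init_snd, alt_eq t]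
  rcases lt_trichotomy (t - 799) 0 with hd | hd | hd
  · have hne : ¬ (t - 799 > 0) := by omega
    rw [clA_iter_eq_neg (t - 799) hd]
    have hn : (t - 799).natAbs = (t - 799).natAbs % 19 + 19 * ((t - 799).natAbs / 19) := by omega
    conv_lhs => rw [hn]
    rw [main_items (-1) ((t - 799).natAbs / 19) ((t - 799).natAbs % 19)
          (clLoop_rem_neg _ (by omega)) clLoop_cycle_neg]
    simp only [if_neg hne]
  · have ht : t = 799 := by omega
    subst ht
    decide
  · rw [clA_iter_eq_pos (t - 799) hd]
    have hn : (t - 799).natAbs = (t - 799).natAbs % 19 + 19 * ((t - 799).natAbs / 19) := by omega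
    conv_lhs => rw [hn]
    rw [main_items 1 ((t - 799).natAbs / 19) ((t - 799).natAbs % 19)
          (clLoop_rem_pos _ (by omega)) clLoop_cycle_pos]
    simp only [if_pos hd]
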